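-- pv_equiv track=rewrite | github.com/TurboWay/spiderman | SP/utils/tool.py | url_check
-- ===== SOURCE A (Python) =====
-- def url_check(url, dirty_words=None):
--     """
--     url 的可用性检查，可用返回True 不可用返回False【根据脏字过滤url】
--     :param url: 根据脏字 检查url是否可用
--     :return: 可用返回 True 不可用 False
--     """
--     keywords = [
--         'baidu.com', 'javascript', 'mailto:', 'sougou.com',
--         '@qq.com', '@gmail.com', '@163.com', '@yahoo.com', '@msn.com', '@hotmail.com', '@aol.com', '@ask.com',
--         '@live.com', '@0355.net', '@163.net', '@263.net', '@3721.net', '@yeah'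
--     ]
--     if dirty_words:  # 自定义脏字
--         dirty_words = [dirty_words] if not isinstance(dirty_words, list) else dirty_words  # 兼容其他类型传参
--         keywords += dirty_words
--
--     for keyword in keywords:
--         if keyword in url:
--             return False
--     return True
-- ===== SOURCE B (Python) =====
-- def url_check(url, dirty_words=None):
--     keywords = [
--         'baidu.com', 'javascript', 'mailto:', 'sougou.com',
--         '@qq.com', '@gmail.com', '@163.com', '@yahoo.com', '@msn.com', '@hotmail.com', '@aol.com', '@ask.com',
--         '@live.com', '@0355.net', '@163.net', '@263.net', '@3721.net', '@yeah'
--     ]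
--     if dirty_words:
--         keywords = keywords + (dirty_words if isinstance(dirty_words, list) else [dirty_words])
--     # single left-to-right scan over positions of url: at each position test
--     # whether some blacklisted keyword starts there
--     for i in range(len(url) + 1):
--         for k in keywords:
--             if url.startswith(k, i):
--                 return False
--     return True
-- ===== Notes on version B (the rewrite author's own statement) =====
-- stated objective: alternative
-- what changed: A runs one full substring search per keyword over the whole url; B makes a single position-by-position scan of the url and at each position tests whether any keyword starts there (keyword-outer search replaced by position-outer scan).
import Mathlib
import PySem

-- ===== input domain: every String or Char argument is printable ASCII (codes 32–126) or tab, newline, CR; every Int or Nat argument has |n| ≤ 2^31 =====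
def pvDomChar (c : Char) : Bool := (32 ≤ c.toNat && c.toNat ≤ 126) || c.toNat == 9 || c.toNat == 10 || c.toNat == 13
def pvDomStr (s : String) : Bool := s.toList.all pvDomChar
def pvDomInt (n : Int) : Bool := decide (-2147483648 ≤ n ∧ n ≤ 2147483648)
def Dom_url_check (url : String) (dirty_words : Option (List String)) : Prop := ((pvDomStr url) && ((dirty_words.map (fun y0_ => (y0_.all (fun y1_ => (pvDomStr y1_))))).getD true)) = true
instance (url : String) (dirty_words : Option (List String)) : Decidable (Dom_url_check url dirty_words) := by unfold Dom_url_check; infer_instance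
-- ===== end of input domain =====

-- B replaces A's keyword-outer loop of full substring searches by a single
-- position-outer scan of url testing each position for a keyword start (objective: alternative).

-- ===== PORT A =====
def pvFixedKeywords : List String :=
  ["baidu.com", "javascript", "mailto:", "sougou.com",
   "@qq.com", "@gmail.com", "@163.com", "@yahoo.com", "@msn.com", "@hotmail.com", "@aol.com", "@ask.com",
   "@live.com", "@0355.net", "@163.net", "@263.net", "@3721.net", "@yeah"]

-- 'if dirty_words:' — a list argument is truthy iff nonempty (the isinstance branch
-- is vacuous under the type Option (List String))
def pvKeywordsA (dirty_words : Option (List String)) : List String :=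
  match dirty_words with
  | none => pvFixedKeywords
  | some l => if l.isEmpty then pvFixedKeywords else pvFixedKeywords ++ l

-- 'for keyword in keywords: if keyword in url: return False' / 'return True'
def pvLoopA (kws : List String) (url : String) : Bool :=
  match kws with
  | [] => true
  | k :: rest => if PySem.Str.isIn k url then false else pvLoopA rest url

def url_check (url : String) (dirty_words : Option (List String)) : Bool :=
  pvLoopA (pvKeywordsA dirty_words) url

-- ===== PORT B =====
-- same keyword normalization as Source B
def pvKeywordsB (dirty_words : Option (List String)) : List (List Char) :=
  (match dirty_words with
   | none => pvFixedKeywords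
   | some l => if l.isEmpty then pvFixedKeywords else pvFixedKeywords ++ l).map String.toList

-- 'for i in range(len(url)+1): for k in keywords: if url.startswith(k, i): return False'
-- ported by structural recursion on the suffix url[i:] (url.startswith(k, i) is exact:
-- it holds iff k is a prefix of url[i:]); positions 0..len(url) inclusive.
def pvScanB (kws : List (List Char)) : List Char → Bool
  | [] => !(kws.any (fun k => PySem.Chars.startswith [] k))
  | c :: t =>
      if kws.any (fun k => PySem.Chars.startswith (c :: t) k) then false
      else pvScanB kws t

def url_check_alt (url : String) (dirty_words : Option (List String)) : Bool :=
  pvScanB (pvKeywordsB dirty_words) url.toList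

-- ===== PRECONDITION & SPEC =====
def Spec_url_check (url : String) (dirty_words : Option (List String)) (out : Bool) : Prop := out = url_check_alt url dirty_words
instance (url : String) (dirty_words : Option (List String)) (out : Bool) : Decidable (Spec_url_check url dirty_words out) := by unfold Spec_url_check; infer_instance

-- ===== CLAIM (what is proved, stated in full; the proofs are below) =====
def Claim_equal_url_check : Prop := ∀ (url : String) (dirty_words : Option (List String)), Dom_url_check url dirty_words → Spec_url_check url dirty_words (url_check url dirty_words)

-- ===== LEMMAS AND PROOFS =====

-- A's loop returns whether no keyword occurs in url
theorem pvLoopA_eq_all (kws : List String) (url : String) :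
    pvLoopA kws url = kws.all (fun k => !PySem.Str.isIn k url) := by
  induction kws with
  | nil => rfl
  | cons k rest ih =>
      simp only [pvLoopA, List.all_cons, ih]
      rcases h : PySem.Str.isIn k url with _ | _ <;> simp

-- 'k occurs in c::t' splits into 'k starts at position 0' or 'k occurs in t'
theorem pvIsIn_cons (k : List Char) (c : Char) (t : List Char) :
    PySem.Chars.isIn k (c :: t)
      = (PySem.Chars.startswith (c :: t) k || PySem.Chars.isIn k t) := by
  rw [Bool.eq_iff_iff, PySem.Chars.isIn_iff_infix, Bool.or_eq_true,
    PySem.Chars.startswith_iff, PySem.Chars.isIn_iff_infix, List.infix_cons_iff]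

-- at the end of the string only the empty keyword can still start
theorem pvStartswith_nil_eq_isIn_nil (k : List Char) :
    PySem.Chars.startswith [] k = PySem.Chars.isIn k [] := by
  rw [Bool.eq_iff_iff, PySem.Chars.startswith_iff, PySem.Chars.isIn_iff_infix,
    List.prefix_nil, List.infix_nil]

-- B's scan returns whether no keyword occurs in the scanned string
theorem pvScanB_eq_all (kws : List (List Char)) (s : List Char) :
    pvScanB kws s = kws.all (fun k => !PySem.Chars.isIn k s) := by
  induction s with
  | nil =>
      simp only [pvScanB, List.any_eq_not_all_not, Bool.not_not]
      exact List.all_congr rfl (fun k => by rw [pvStartswith_nil_eq_isIn_nil])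
  | cons c t ih =>
      simp only [pvScanB, ih, List.any_eq_not_all_not]
      cases hall : kws.all (fun k => !PySem.Chars.startswith (c :: t) k) with
      | false =>
          simp only [Bool.not_false, if_true]
          rcases List.all_eq_false.mp hall with ⟨k, hk, hkp⟩
          simp only [Bool.not_eq_true] at hkp
          symm
          rw [List.all_eq_false]
          refine ⟨k, hk, ?_⟩
          simp [pvIsIn_cons, hkp]
      | true =>
          simp only [Bool.not_true, Bool.false_eq_true, if_false]
          rw [Bool.eq_iff_iff, List.all_eq_true, List.all_eq_true]
          constructor
          · intro h k hk
            have hs := List.all_eq_true.mp hall k hk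
            simp only [Bool.not_eq_eq_eq_not, Bool.not_true] at hs
            have ht := h k hk
            simp only [Bool.not_eq_eq_eq_not, Bool.not_true] at ht
            simp [pvIsIn_cons, hs, ht]
          · intro h k hk
            have ht := h k hk
            simp only [pvIsIn_cons, Bool.not_or, Bool.and_eq_true] at ht
            simp [ht.2]

-- ===== VERDICT (by name: the statement is the Claim_ definition above) =====
theorem url_check_spec : Claim_equal_url_check := by
  intro url dirty_words _
  show url_check url dirty_words = url_check_alt url dirty_words
  unfold url_check url_check_alt
  rw [pvLoopA_eq_all, pvScanB_eq_all,
    show pvKeywordsB dirty_words = (pvKeywordsA dirty_words).map String.toList from rfl,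
    List.all_map]
  exact List.all_congr rfl (fun k => by simp [PySem.Str.isIn])
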